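-- pv_equiv track=rewrite | github.com/Nidocq/Miscellaneous | Python/projectEuler.net/highly_divi_number_P12.py | triSeq
-- ===== SOURCE A (Python) =====
-- def triSeq(seq):
-- 	buff = 0
-- 	b = 1
-- 	for i in range(1, seq+1):
-- 		a = b
-- 		b += i
-- 		buff += a
--
-- 	return a
-- ===== SOURCE B (Python) =====
-- def triSeq(seq):
--     return 1 + seq * (seq - 1) // 2
-- ===== Notes on version B (the rewrite author's own statement) =====
-- stated objective: faster
-- what changed: Replaces the accumulating loop over range(1, seq+1) with the closed form 1 + seq*(seq-1)//2.
import Mathlib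
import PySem

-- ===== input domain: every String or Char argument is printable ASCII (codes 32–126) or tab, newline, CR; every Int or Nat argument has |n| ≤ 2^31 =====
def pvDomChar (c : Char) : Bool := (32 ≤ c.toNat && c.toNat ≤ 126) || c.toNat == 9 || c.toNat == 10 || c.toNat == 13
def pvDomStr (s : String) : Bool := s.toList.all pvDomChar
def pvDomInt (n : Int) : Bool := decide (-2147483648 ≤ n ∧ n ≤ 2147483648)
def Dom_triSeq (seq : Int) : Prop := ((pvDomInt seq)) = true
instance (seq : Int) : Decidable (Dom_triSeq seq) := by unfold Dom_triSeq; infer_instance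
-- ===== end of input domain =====

-- B replaces A's accumulating loop with the closed form 1 + seq*(seq-1)//2 (O(1) instead of O(seq)).


-- ===== PORT A =====
-- state = (buff, b, a); 'a' starts at 0 standing in for Python's unbound variable,
-- which is never returned inside Pre_triSeq (seq ≥ 1 runs the loop at least once).
def triSeq (seq : Int) : Int :=
  let st := (PySem.List.pyRange 1 (seq + 1) 1).foldl
    (fun (st : Int × Int × Int) i =>
      let a := st.2.1
      let b := st.2.1 + i
      let buff := st.1 + a
      (buff, b, a))
    (0, 1, 0)
  st.2.2

-- ===== PORT B =====
def triSeq_alt (seq : Int) : Int := 1 + PySem.Int.floordiv (seq * (seq - 1)) 2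

-- ===== PRECONDITION & SPEC =====
-- For seq < 1 the loop body never runs and 'return a' raises UnboundLocalError in A.
def Pre_triSeq (seq : Int) : Prop := 1 ≤ seq
instance (seq : Int) : Decidable (Pre_triSeq seq) := by unfold Pre_triSeq; infer_instance
def pvWitness_triSeq : Int := 3

def Spec_triSeq (seq : Int) (out : Int) : Prop := out = triSeq_alt seq
instance (seq : Int) (out : Int) : Decidable (Spec_triSeq seq out) := by unfold Spec_triSeq; infer_instance

-- ===== CLAIM (what is proved, stated in full; the proofs are below) =====
def Claim_equal_triSeq : Prop := ∀ (seq : Int), Dom_triSeq seq → Pre_triSeq seq → Spec_triSeq seq (triSeq seq)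

-- ===== LEMMAS AND PROOFS =====

-- loop invariant: after folding the first n loop iterations, 2*b = 2 + n(n+1),
-- and for n ≥ 1, 2*a = 2 + n(n-1)
theorem triSeq_loop_inv (n : Nat) :
    ∃ buff b a : Int,
      ((List.range n).map (fun k : Nat => (1 : Int) + k)).foldl
        (fun (st : Int × Int × Int) i =>
          let a := st.2.1
          let b := st.2.1 + i
          let buff := st.1 + a
          (buff, b, a))
        (0, 1, 0) = (buff, b, a)
      ∧ 2 * b = 2 + (n : Int) * (n + 1)
      ∧ (1 ≤ n → 2 * a = 2 + (n : Int) * (n - 1)) := by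
  induction n with
  | zero => exact ⟨0, 1, 0, by simp, by simp, by omega⟩
  | succ k ih =>
    obtain ⟨buff, b, a, hfold, hb, _⟩ := ih
    refine ⟨buff + b, b + (1 + k), b, ?_, ?_, ?_⟩
    · simp [List.range_succ, List.foldl_append, hfold]
    · push_cast; nlinarith
    · intro _; push_cast; nlinarith

theorem triSeq_closed (seq : Int) (h : 1 ≤ seq) :
    2 * triSeq seq = 2 + seq * (seq - 1) := by
  obtain ⟨n, rfl⟩ : ∃ n : Nat, seq = (n : Int) := ⟨seq.toNat, by omega⟩
  obtain ⟨buff, b, a, hfold, _, ha⟩ := triSeq_loop_inv n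
  have hn : 1 ≤ n := by exact_mod_cast h
  have hr : PySem.List.pyRange 1 ((n : Int) + 1) 1
      = (List.range n).map (fun k : Nat => (1 : Int) + k) := by
    rw [PySem.List.pyRange_one]
    simp
  simp only [triSeq, hr, hfold]
  exact ha hn

-- ===== VERDICT (by name: the statement is the Claim_ definition above) =====
theorem triSeq_spec : Claim_equal_triSeq := by
  intro seq _ hpre
  unfold Spec_triSeq triSeq_alt
  have h2 := triSeq_closed seq hpre
  have hfd : PySem.Int.floordiv (seq * (seq - 1)) 2 = seq * (seq - 1) / 2 :=
    PySem.Int.floordiv_eq_ediv_of_pos (by omega)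
  omega
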